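-- pv_equiv track=rewrite | github.com/weronikadomczewska/NLP-address-data-parsing | data_preparation/labels.py | bio_to_dict
-- ===== SOURCE A (Python) =====
-- from typing import Dict, List, Tuple
--
-- def bio_to_dict(tokens: Tuple[str, ...], labels: List[str]) -> Dict[str, str]:
--     """Convert BIO sequence labels back into a dictionary of address fields."""
--     result: Dict[str, str] = {}
--     current_field = None
--     current_tokens: List[str] = []
--
--     for token, label in zip(tokens, labels):
--         if label.startswith("B-"):
--             if current_field:
--                 result[current_field] = " ".join(current_tokens)
--             current_field = label[2:]
--             current_tokens = [token]
--         elif label.startswith("I-") and label[2:] == current_field: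
--             current_tokens.append(token)
--         else:
--             if current_field:
--                 result[current_field] = " ".join(current_tokens)
--             current_field, current_tokens = None, []
--
--     if current_field:
--         result[current_field] = " ".join(current_tokens)
--
--     return result
-- ===== SOURCE B (Python) =====
-- from typing import Dict, List, Tuple
--
-- def bio_to_dict(tokens: Tuple[str, ...], labels: List[str]) -> Dict[str, str]:
--     """Anchor-and-extend scan: find each B- anchor, extend over its I- run."""
--     pairs = list(zip(tokens, labels))
--     result: Dict[str, str] = {}
--     n = len(pairs)
--     i = 0
--     while i < n:
--         tok, lab = pairs[i]
--         if lab.startswith("B-"):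
--             field = lab[2:]
--             parts = [tok]
--             j = i + 1
--             while j < n and pairs[j][1] == "I-" + field:
--                 parts.append(pairs[j][0])
--                 j += 1
--             if field:
--                 result[field] = " ".join(parts)
--             i = j
--         else:
--             i += 1
--     return result
-- ===== Notes on version B (the rewrite author's own statement) =====
-- stated objective: alternative
-- what changed: Replaced A's single-pass flush-on-transition state machine (current_field/current_tokens carried across iterations with a trailing flush) by an anchor-and-extend scan: an outer loop jumps between B- anchors and an inner while-loop collects the matching I- run, storing each span immediately.
import Mathlib
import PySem

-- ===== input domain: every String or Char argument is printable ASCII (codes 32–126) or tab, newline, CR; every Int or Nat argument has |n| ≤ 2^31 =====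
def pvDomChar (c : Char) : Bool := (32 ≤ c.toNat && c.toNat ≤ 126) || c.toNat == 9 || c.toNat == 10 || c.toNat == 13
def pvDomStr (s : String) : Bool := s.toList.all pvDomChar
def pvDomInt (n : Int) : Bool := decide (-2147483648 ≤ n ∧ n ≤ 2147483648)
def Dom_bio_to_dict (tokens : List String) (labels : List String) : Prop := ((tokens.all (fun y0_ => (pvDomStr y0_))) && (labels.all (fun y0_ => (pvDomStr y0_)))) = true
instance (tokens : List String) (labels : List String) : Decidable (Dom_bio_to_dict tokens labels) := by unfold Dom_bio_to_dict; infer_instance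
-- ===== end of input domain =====

-- B replaces A's flush-on-transition state machine by an anchor-and-extend scan (alternative decomposition, same cost).

-- ===== PORT A =====
-- the trailing `if current_field: result[current_field] = " ".join(current_tokens)` flush
def bioFlush (result : PySem.Dict String String) (cf : Option String) (ct : List String) : PySem.Dict String String :=
  match cf with
  | some f => if f == "" then result else result.insert f (PySem.Str.join " " ct)
  | none => result

-- the `for token, label in zip(tokens, labels)` loop, state (result, current_field, current_tokens); base case = trailing flush
def bioGoA : List (String × String) → PySem.Dict String String → Option String → List String → PySem.Dict String String
  | [], result, cf, ct => bioFlush result cf ct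
  | (token, label) :: rest, result, cf, ct =>
    if PySem.Str.startswith label "B-" then
      bioGoA rest (bioFlush result cf ct) (some (PySem.Str.slice label (some 2) none)) [token]
    else if PySem.Str.startswith label "I-" && (cf == some (PySem.Str.slice label (some 2) none)) then
      bioGoA rest result cf (ct ++ [token])
    else
      bioGoA rest (bioFlush result cf ct) none []

def bio_to_dict (tokens : List String) (labels : List String) : List (String × String) :=
  (bioGoA (tokens.zip labels) PySem.Dict.empty none []).items

-- ===== PORT B =====
-- the inner `while j < n and pairs[j][1] == "I-" + field` loop: the collected run and the remainder
def bioSpan (field : String) : List (String × String) → List String × List (String × String)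
  | [] => ([], [])
  | (tok, lab) :: rest =>
    if lab == "I-" ++ field then
      let p := bioSpan field rest
      (tok :: p.1, p.2)
    else ([], (tok, lab) :: rest)

theorem bioSpan_len (field : String) : ∀ l : List (String × String), (bioSpan field l).2.length ≤ l.length := by
  intro l
  induction l with
  | nil => simp [bioSpan]
  | cons hd tl ih =>
    obtain ⟨tok, lab⟩ := hd
    by_cases h : lab == "I-" ++ field <;> simp [bioSpan, h]
    omega

-- the outer `while i < n` loop jumping between B- anchors
def bioGoB : List (String × String) → PySem.Dict String String → PySem.Dict String String
  | [], result => result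
  | (tok, lab) :: rest, result =>
    if PySem.Str.startswith lab "B-" then
      let field := PySem.Str.slice lab (some 2) none
      let p := bioSpan field rest
      bioGoB p.2 (if field == "" then result else result.insert field (PySem.Str.join " " (tok :: p.1)))
    else bioGoB rest result
termination_by l => l.length
decreasing_by
  · exact Nat.lt_succ_of_le (bioSpan_len _ rest)
  · simp

def bio_to_dict_alt (tokens : List String) (labels : List String) : List (String × String) :=
  (bioGoB (tokens.zip labels) PySem.Dict.empty).items

-- ===== PRECONDITION & SPEC =====
def Spec_bio_to_dict (tokens : List String) (labels : List String) (out : List (String × String)) : Prop := out = bio_to_dict_alt tokens labels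
instance (tokens : List String) (labels : List String) (out : List (String × String)) : Decidable (Spec_bio_to_dict tokens labels out) := by unfold Spec_bio_to_dict; infer_instance

-- ===== CLAIM (what is proved, stated in full; the proofs are below) =====
def Claim_equal_bio_to_dict : Prop := ∀ (tokens : List String) (labels : List String), Dom_bio_to_dict tokens labels → Spec_bio_to_dict tokens labels (bio_to_dict tokens labels)

-- ===== LEMMAS AND PROOFS =====

-- slicing "I-"-prefixed label text: label[2:]
theorem bioSliceIfield (cs : List Char) : PySem.List.slice ('I' :: '-' :: cs) (some 2) none = cs := by
  rw [PySem.List.slice_from _ (by norm_num)]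
  rfl

-- A's continuation test (startswith "I-" and label[2:] == field) is exactly B's test label == "I-" + field
theorem bio_label_I_iff (lab field : String) :
    (lab = "I-" ++ field) ↔ (PySem.Str.startswith lab "I-" = true ∧ PySem.Str.slice lab (some 2) none = field) := by
  constructor
  · rintro rfl
    refine ⟨by simp [PySem.Chars.startswith_iff], ?_⟩
    apply String.toList_inj.mp
    simp [PySem.Str.toList_slice, PySem.Chars.slice_eq_listSlice, String.toList_append, bioSliceIfield]
  · rintro ⟨h1, h2⟩
    apply String.toList_inj.mp
    rw [String.toList_append, ← h2]
    simp only [PySem.Str.startswith_eq, PySem.Chars.startswith_iff] at h1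
    obtain ⟨t, ht⟩ := h1
    simp only [PySem.Str.toList_slice, PySem.Chars.slice_eq_listSlice]
    rw [← ht]
    simp [bioSliceIfield]

theorem bio_not_B_of_I (lab field : String) (h : lab = "I-" ++ field) :
    PySem.Str.startswith lab "B-" = false := by
  subst h
  simp only [PySem.Str.startswith_eq, String.toList_append]
  cases hB : PySem.Chars.startswith ("I-".toList ++ field.toList) "B-".toList with
  | false => rfl
  | true =>
    rw [PySem.Chars.startswith_iff] at hB
    simp [List.cons_prefix_cons] at hB

-- mid-span invariant: from a live field, A consumes exactly the I- run bioSpan finds, then flushes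
theorem bioGoA_mid (field : String) : ∀ (rest : List (String × String)) (result : PySem.Dict String String) (ct : List String),
    bioGoA rest result (some field) ct =
      bioGoA (bioSpan field rest).2 (bioFlush result (some field) (ct ++ (bioSpan field rest).1)) none [] := by
  intro rest
  induction rest with
  | nil => intro result ct; simp [bioSpan, bioGoA, bioFlush]
  | cons hd tl ih =>
    obtain ⟨tok, lab⟩ := hd
    intro result ct
    by_cases h : lab = "I-" ++ field
    · have hB := bio_not_B_of_I lab field h
      have hI := (bio_label_I_iff lab field).mp h
      have hcond : (PySem.Str.startswith lab "I-" && (some field == some (PySem.Str.slice lab (some 2) none))) = true := by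
        rw [hI.2, hI.1]; simp
      have hbe : (lab == "I-" ++ field) = true := by simp [h]
      simp only [bioGoA, bioSpan, hB, hbe, Bool.false_eq_true, if_false, hcond, if_true]
      rw [ih]
      simp
    · have hbe : (lab == "I-" ++ field) = false := beq_eq_false_iff_ne.mpr h
      have hIfalse : (PySem.Str.startswith lab "I-" && (some field == some (PySem.Str.slice lab (some 2) none))) = false := by
        cases hs : PySem.Str.startswith lab "I-" with
        | false => simp
        | true =>
          simp only [Bool.true_and]
          cases he : (some field == some (PySem.Str.slice lab (some 2) none)) with
          | false => rfl
          | true =>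
            exfalso
            apply h
            exact (bio_label_I_iff lab field).mpr ⟨hs, (Option.some_inj.mp (beq_iff_eq.mp he)).symm⟩
      simp only [bioSpan, hbe, Bool.false_eq_true, if_false]
      by_cases hB : PySem.Str.startswith lab "B-" = true
      · simp only [bioGoA, hB, if_true, bioFlush, List.append_nil]
      · simp only [bioGoA, hB, if_false, hIfalse, Bool.false_eq_true, bioFlush, List.append_nil]
        have : (((none : Option String) == some (PySem.Str.slice lab (some 2) none))) = false := rfl
        simp [this]

theorem bioGoA_eq_goB : ∀ (n : Nat) (l : List (String × String)) (result : PySem.Dict String String),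
    l.length ≤ n → bioGoA l result none [] = bioGoB l result := by
  intro n
  induction n with
  | zero =>
    intro l result hl
    have : l = [] := List.eq_nil_of_length_eq_zero (Nat.le_zero.mp hl)
    subst this
    simp [bioGoA, bioFlush, bioGoB]
  | succ n ih =>
    intro l result hl
    match l with
    | [] => simp [bioGoA, bioFlush, bioGoB]
    | (tok, lab) :: rest =>
      by_cases hB : PySem.Str.startswith lab "B-" = true
      · simp only [bioGoA, hB, if_true, bioFlush]
        rw [bioGoA_mid]
        rw [ih _ _ (le_trans (bioSpan_len _ rest) (by simpa using hl))]
        conv_rhs => rw [bioGoB]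
        rw [if_pos hB]
        simp only [bioFlush, List.singleton_append]
      · have hB' : PySem.Str.startswith lab "B-" = false := by
          simpa using hB
        have hIfalse : (PySem.Str.startswith lab "I-" && ((none : Option String) == some (PySem.Str.slice lab (some 2) none))) = false := by
          simp
        simp only [bioGoA, hB', Bool.false_eq_true, if_false, hIfalse, bioFlush]
        rw [ih _ _ (by simpa using hl)]
        conv_rhs => rw [bioGoB]
        rw [if_neg hB]

-- ===== VERDICT (by name: the statement is the Claim_ definition above) =====
theorem bio_to_dict_spec : Claim_equal_bio_to_dict := by
  intro tokens labels _
  unfold Spec_bio_to_dict bio_to_dict bio_to_dict_alt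
  rw [bioGoA_eq_goB (tokens.zip labels).length _ _ le_rfl]
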